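-- pv_equiv track=rewrite | github.com/CaneMandarinesco/unitvg_algoritmi | problemset1_problema2.py | find_delta
-- ===== SOURCE A (Python) =====
-- def find_delta(d, t, M, j):
--     # d:  delta
--     # t:  lista di tempi di arrivo
--     # M:  tempo limite
--     # j:  indice sinistro, considero l'array a da j a n
--     # ritorna: delta primo, massimo, possibile per l'array da j a n
--
--     n  = len(t)
--
--     # -- CASO BASE --
--     if n-j == 1:
--         # e' l'unico delta primo possibile per un array di 1 elemento
--         d1 = M - t[n-1] - 1
--         if d1 < d:
--             return -1
--         return d1
--
--     # -- CASO RICORSIVO --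
--     d1 = find_delta(d, t, M, j+1)
--
--     # controlla se si crea una coda.
--     if t[j] + d1 > t[j+1]:
--         # devo aggiornare d1 altrimenti sforo sicuramente il tempo M.
--         d1 = (M - t[j] - 1) // (n-j)
--         if d1 < d:
--             return -1
--
--     return d1
-- ===== SOURCE B (Python) =====
-- def find_delta(d, t, M, j):
--     n = len(t)
--     d1 = M - t[n-1] - 1
--     if d1 < d:
--         d1 = -1
--     k = n - 2
--     while k > j - 1:
--         if t[k] + d1 > t[k+1]:
--             d1 = (M - t[k] - 1) // (n - k)
--             if d1 < d:
--                 d1 = -1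
--         k -= 1
--     return d1
-- ===== Notes on version B (the rewrite author's own statement) =====
-- stated objective: simpler
-- what changed: A's right-to-left recursion is replaced by an explicit descending loop that carries the -1 sentinel in a running variable instead of early returns through the call stack.
import Mathlib
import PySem

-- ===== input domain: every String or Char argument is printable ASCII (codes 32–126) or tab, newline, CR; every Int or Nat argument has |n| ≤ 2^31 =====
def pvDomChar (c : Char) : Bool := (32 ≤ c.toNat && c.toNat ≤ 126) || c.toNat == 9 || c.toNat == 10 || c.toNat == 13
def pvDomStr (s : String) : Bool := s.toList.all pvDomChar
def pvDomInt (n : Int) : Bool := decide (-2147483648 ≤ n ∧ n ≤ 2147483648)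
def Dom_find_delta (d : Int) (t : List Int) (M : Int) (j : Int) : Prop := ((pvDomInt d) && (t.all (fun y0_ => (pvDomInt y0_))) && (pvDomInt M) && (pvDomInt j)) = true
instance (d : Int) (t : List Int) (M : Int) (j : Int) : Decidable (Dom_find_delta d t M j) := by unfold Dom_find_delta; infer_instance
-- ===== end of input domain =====

-- B replaces A's right-to-left recursion by an explicit descending loop that carries -1 as a
-- running sentinel value (objective: simpler — no recursion, no early returns).

-- ===== PORT A =====
-- A's recursion on j; the fuel argument only makes the recursion total (Pre_ guarantees it suffices;
-- Python indexing t[i], incl. negative wraparound, is PySem.List.pyGetD, in range under Pre_).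
def findDeltaAux (d : Int) (t : List Int) (M : Int) (j : Int) : Nat → Int
  | 0 => 0
  | fuel + 1 =>
    let n : Int := t.length
    if n - j = 1 then
      let d1 := M - PySem.List.pyGetD t (n - 1) 0 - 1
      if d1 < d then -1 else d1
    else
      let d1 := findDeltaAux d t M (j + 1) fuel
      if PySem.List.pyGetD t j 0 + d1 > PySem.List.pyGetD t (j + 1) 0 then
        let d1' := PySem.Int.floordiv (M - PySem.List.pyGetD t j 0 - 1) (n - j)
        if d1' < d then -1 else d1'
      else d1

def find_delta (d : Int) (t : List Int) (M : Int) (j : Int) : Int :=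
  findDeltaAux d t M j ((↑t.length - j).toNat)

-- ===== PORT B =====
-- B's while loop, k descending from n-2 to j; fuel = number of iterations left.
def findDeltaLoop (d : Int) (t : List Int) (M : Int) (n : Int) (j : Int) : Nat → Int → Int → Int
  | 0, _, d1 => d1
  | fuel + 1, k, d1 =>
    if k > j - 1 then
      let d1' :=
        if PySem.List.pyGetD t k 0 + d1 > PySem.List.pyGetD t (k + 1) 0 then
          let v := PySem.Int.floordiv (M - PySem.List.pyGetD t k 0 - 1) (n - k)
          if v < d then -1 else v
        else d1
      findDeltaLoop d t M n j fuel (k - 1) d1'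
    else d1

def find_delta_alt (d : Int) (t : List Int) (M : Int) (j : Int) : Int :=
  let n : Int := t.length
  let d0 := M - PySem.List.pyGetD t (n - 1) 0 - 1
  let d0 := if d0 < d then -1 else d0
  findDeltaLoop d t M n j ((n - 1 - j).toNat) (n - 2) d0

-- ===== PRECONDITION & SPEC =====
-- Pre_ excludes exactly the inputs where Python A raises: j ≥ len(t) (the recursion never reaches
-- its base case, RecursionError) and j < -len(t) (IndexError on t[j]).
def Pre_find_delta (d : Int) (t : List Int) (M : Int) (j : Int) : Prop :=
  -(↑t.length : Int) ≤ j ∧ j < ↑t.length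
instance (d : Int) (t : List Int) (M : Int) (j : Int) : Decidable (Pre_find_delta d t M j) := by
  unfold Pre_find_delta; infer_instance

def pvWitness_find_delta : Int × List Int × Int × Int := (1, [1, 3, 7], 10, 0)

def Spec_find_delta (d : Int) (t : List Int) (M : Int) (j : Int) (out : Int) : Prop := out = find_delta_alt d t M j
instance (d : Int) (t : List Int) (M : Int) (j : Int) (out : Int) : Decidable (Spec_find_delta d t M j out) := by unfold Spec_find_delta; infer_instance

-- ===== CLAIM (what is proved, stated in full; the proofs are below) =====
def Claim_equal_find_delta : Prop := ∀ (d : Int) (t : List Int) (M : Int) (j : Int), Dom_find_delta d t M j → Pre_find_delta d t M j → Spec_find_delta d t M j (find_delta d t M j)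

-- ===== LEMMAS AND PROOFS =====

-- unfolding A's recursive case: one recursion level is one loop-body application
theorem findDeltaAux_step (d : Int) (t : List Int) (M : Int) (j : Int) (fuel : Nat)
    (h : (↑t.length : Int) - j ≠ 1) :
    findDeltaAux d t M j (fuel + 1) =
      (let d1 := findDeltaAux d t M (j + 1) fuel
       if PySem.List.pyGetD t j 0 + d1 > PySem.List.pyGetD t (j + 1) 0 then
         let d1' := PySem.Int.floordiv (M - PySem.List.pyGetD t j 0 - 1) ((↑t.length : Int) - j)
         if d1' < d then -1 else d1'
       else d1) := by
  simp only [findDeltaAux, if_neg h]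

-- the loop, started at k with accumulator A(k+1), computes A(j)
theorem loop_absorb (d : Int) (t : List Int) (M : Int) (j : Int) :
    ∀ (c : Nat) (k : Int), j - 1 ≤ k → k ≤ (↑t.length : Int) - 2 → (k - (j - 1)).toNat = c →
      findDeltaLoop d t M (↑t.length) j c k
          (findDeltaAux d t M (k + 1) ((↑t.length - k - 1).toNat)) =
        findDeltaAux d t M j ((↑t.length - j).toNat) := by
  intro c
  induction c with
  | zero =>
    intro k hk1 _ hc
    have hkj : k = j - 1 := by omega
    subst hkj
    simp only [findDeltaLoop]
    congr 1 <;> omega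
  | succ c ih =>
    intro k hk1 hk2 hc
    have hkj : j ≤ k := by omega
    have hguard : k > j - 1 := by omega
    have hne : (↑t.length : Int) - k ≠ 1 := by omega
    have hfuel : (↑t.length - k).toNat = (↑t.length - k - 1).toNat + 1 := by omega
    have hstep : findDeltaAux d t M k ((↑t.length - k).toNat) =
        (let d1 := findDeltaAux d t M (k + 1) ((↑t.length - k - 1).toNat)
         if PySem.List.pyGetD t k 0 + d1 > PySem.List.pyGetD t (k + 1) 0 then
           let d1' := PySem.Int.floordiv (M - PySem.List.pyGetD t k 0 - 1) ((↑t.length : Int) - k)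
           if d1' < d then -1 else d1'
         else d1) := by
      rw [hfuel]; exact findDeltaAux_step d t M k _ hne
    have this1 := ih (k - 1) (by omega) (by omega) (by omega)
    rw [show (↑t.length : Int) - (k - 1) - 1 = ↑t.length - k by ring,
        show k - 1 + 1 = k by ring] at this1
    rw [findDeltaLoop, if_pos hguard, ← this1, hstep]

-- ===== VERDICT (by name: the statement is the Claim_ definition above) =====
theorem find_delta_spec : Claim_equal_find_delta := by
  intro d t M j _ hpre
  obtain ⟨hlo, hhi⟩ := hpre
  unfold Spec_find_delta find_delta find_delta_alt
  show findDeltaAux d t M j ((↑t.length - j).toNat) =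
    findDeltaLoop d t M (↑t.length) j ((↑t.length - 1 - j).toNat) (↑t.length - 2)
      (if M - PySem.List.pyGetD t (↑t.length - 1) 0 - 1 < d then -1
       else M - PySem.List.pyGetD t (↑t.length - 1) 0 - 1)
  have hacc : findDeltaAux d t M (↑t.length - 1) 1 =
      (if M - PySem.List.pyGetD t (↑t.length - 1) 0 - 1 < d then -1
       else M - PySem.List.pyGetD t (↑t.length - 1) 0 - 1) := by
    rw [show (1 : Nat) = 0 + 1 from rfl]
    simp only [findDeltaAux]
    rw [if_pos (show (↑t.length : Int) - (↑t.length - 1) = 1 by ring)]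
  by_cases hbase : j = (↑t.length : Int) - 1
  · have hc : ((↑t.length : Int) - 1 - j).toNat = 0 := by omega
    have hf : ((↑t.length : Int) - j).toNat = 1 := by omega
    rw [hc, hf, hbase, hacc]
    simp only [findDeltaLoop]
  · have h := loop_absorb d t M j ((↑t.length - 1 - j).toNat) (↑t.length - 2)
      (by omega) (by omega) (by omega)
    rw [show (↑t.length : Int) - 2 + 1 = ↑t.length - 1 by ring,
        show ((↑t.length : Int) - (↑t.length - 2) - 1).toNat = 1 by omega, hacc] at h
    exact h.symm
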